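-- pv_equiv track=rewrite | github.com/qup1010/file-organizer-GUI- | file_pilot/analysis/service.py | _dedupe_display_names
-- ===== SOURCE A (Python) =====
-- from collections import Counter
--
-- def _dedupe_display_names(entry_names: list[str]) -> dict[str, str]:
--     counts = Counter(entry_names)
--     seen: dict[str, int] = {}
--     labels: dict[str, str] = {}
--     for entry_name in entry_names:
--         seen[entry_name] = seen.get(entry_name, 0) + 1
--         if counts[entry_name] <= 1:
--             labels[entry_name] = entry_name
--         else:
--             labels[entry_name] = f"{entry_name} ({seen[entry_name]})"
--     return labels
-- ===== SOURCE B (Python) =====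
-- from collections import Counter
--
-- def _dedupe_display_names(entry_names: list[str]) -> dict[str, str]:
--     counts = Counter(entry_names)
--     return {name: (name if c <= 1 else f"{name} ({c})")
--             for name, c in counts.items()}
-- ===== Notes on version B (the rewrite author's own statement) =====
-- stated objective: simpler
-- what changed: Drops A's `seen` dict and the per-element labelling loop entirely: since A overwrites labels[name] at every occurrence, the surviving label always uses the total count, so B builds the result directly as a comprehension over counts.items() (one pass over distinct names instead of a second pass over all elements).
import Mathlib
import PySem

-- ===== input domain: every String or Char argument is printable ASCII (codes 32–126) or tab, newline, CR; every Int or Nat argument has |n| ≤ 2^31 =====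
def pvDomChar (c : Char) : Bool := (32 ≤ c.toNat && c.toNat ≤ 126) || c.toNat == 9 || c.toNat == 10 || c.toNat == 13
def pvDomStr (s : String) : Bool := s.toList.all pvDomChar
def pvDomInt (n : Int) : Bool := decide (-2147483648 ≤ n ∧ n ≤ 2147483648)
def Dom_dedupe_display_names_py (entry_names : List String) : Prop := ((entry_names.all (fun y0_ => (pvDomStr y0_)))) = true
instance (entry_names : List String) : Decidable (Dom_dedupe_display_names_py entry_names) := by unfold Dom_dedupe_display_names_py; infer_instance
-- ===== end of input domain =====

-- B drops A's `seen` dict and per-element labelling loop: A's overwriting always leaves the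
-- total-count label, so B maps directly over the counter's items (objective: simpler).


-- ===== PORT A =====
-- f"{name} ({n})", shared by both ports
def pvFmt (name : String) (n : Int) : String := name ++ " (" ++ PySem.Int.toStr n ++ ")"

-- one iteration of A's for-loop, on the state (seen, labels)
def pvStepA (counts : PySem.Dict String Int)
    (st : PySem.Dict String Int × PySem.Dict String String) (entry_name : String) :
    PySem.Dict String Int × PySem.Dict String String :=
  let seen := st.1.insert entry_name (st.1.getD entry_name 0 + 1)
  let labels :=
    if counts.getD entry_name 0 ≤ 1 then
      st.2.insert entry_name entry_name
    else
      st.2.insert entry_name (pvFmt entry_name (seen.getD entry_name 0))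
  (seen, labels)

def dedupe_display_names_py (entry_names : List String) : List (String × String) :=
  let counts := PySem.Dict.counter entry_names
  (entry_names.foldl (pvStepA counts) (PySem.Dict.empty, PySem.Dict.empty)).2.items

-- ===== PORT B =====
def dedupe_display_names_py_alt (entry_names : List String) : List (String × String) :=
  let counts := PySem.Dict.counter entry_names
  counts.items.map (fun kc => (kc.1, if kc.2 ≤ 1 then kc.1 else pvFmt kc.1 kc.2))

-- ===== PRECONDITION & SPEC =====
def Spec_dedupe_display_names_py (entry_names : List String) (out : List (String × String)) : Prop := out = dedupe_display_names_py_alt entry_names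
instance (entry_names : List String) (out : List (String × String)) : Decidable (Spec_dedupe_display_names_py entry_names out) := by unfold Spec_dedupe_display_names_py; infer_instance

-- ===== CLAIM (what is proved, stated in full; the proofs are below) =====
def Claim_equal_dedupe_display_names_py : Prop := ∀ (entry_names : List String), Dom_dedupe_display_names_py entry_names → Spec_dedupe_display_names_py entry_names (dedupe_display_names_py entry_names)

-- ===== LEMMAS AND PROOFS =====

-- invariant for A's loop: the final label of a key occurring in the remaining list `l`
-- uses the value `seen` will have at that key's LAST occurrence, i.e. seen[k] + l.count k
lemma labels_getD (counts : PySem.Dict String Int) (k : String) (dflt : String) :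
    ∀ (l : List String) (seen : PySem.Dict String Int) (labels : PySem.Dict String String),
      (l.foldl (pvStepA counts) (seen, labels)).2.getD k dflt =
        if k ∈ l then
          (if counts.getD k 0 ≤ 1 then k else pvFmt k (seen.getD k 0 + l.count k))
        else labels.getD k dflt := by
  intro l
  induction l with
  | nil => intro seen labels; simp
  | cons x t ih =>
    intro seen labels
    simp only [List.foldl_cons]
    rw [ih]
    by_cases hkx : k = x
    · subst hkx
      rw [List.count_cons_self]
      simp only [pvStepA, PySem.Dict.getD_insert_self, List.mem_cons, true_or, if_true]
      by_cases hc : counts.getD k 0 ≤ 1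
      · simp [hc, PySem.Dict.getD_insert_self]
      · simp only [if_neg hc]
        split_ifs with hkt
        · congr 1; push_cast; ring
        · rw [PySem.Dict.getD_insert_self]
          congr 1
          rw [List.count_eq_zero.mpr hkt]
          push_cast; ring
    · have hcnt : List.count k (x :: t) = List.count k t := by
        rw [List.count_cons]; simp [Ne.symm hkx]
      rw [hcnt]
      simp only [pvStepA, List.mem_cons]
      have h1 : ∀ v : Int, (seen.insert x v).getD k 0 = seen.getD k 0 := fun v => by
        rw [PySem.Dict.getD_insert]; simp [hkx]
      have h2 : ∀ v, (labels.insert x v).getD k dflt = labels.getD k dflt := fun v => by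
        rw [PySem.Dict.getD_insert]; simp [hkx]
      by_cases hkt : k ∈ t
      · simp [hkt, h1]
      · simp only [hkt, hkx, or_self, if_false]
        split_ifs <;> apply h2

lemma keys_insert_eq_add (d : PySem.Dict String String) (k v : String) :
    (d.insert k v).keys = PySem.Set.add d.keys k := by
  by_cases h : d.contains k = true
  · rw [PySem.Dict.keys_insert_of_contains d v h, PySem.Set.add]
    simp [PySem.Set.contains, (PySem.Dict.contains_iff_mem_keys d k).mp h]
  · rw [PySem.Dict.keys_insert_of_not_contains d v (by simpa using h), PySem.Set.add]
    simp [PySem.Set.contains, (PySem.Dict.contains_iff_mem_keys d k).not.mp h]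

-- the keys of A's labels dict evolve like a Python set update (first occurrences, in order)
lemma labels_keys (counts : PySem.Dict String Int) :
    ∀ (l : List String) (seen : PySem.Dict String Int) (labels : PySem.Dict String String),
      (l.foldl (pvStepA counts) (seen, labels)).2.keys = PySem.Set.update labels.keys l := by
  intro l
  induction l with
  | nil => intro seen labels; simp [PySem.Set.update]
  | cons x t ih =>
    intro seen labels
    simp only [List.foldl_cons]
    rw [ih]
    have hk : (pvStepA counts (seen, labels) x).2.keys = PySem.Set.add labels.keys x := by
      simp only [pvStepA]
      split_ifs <;> exact keys_insert_eq_add ..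
    rw [hk, PySem.Set.update, PySem.Set.update, List.foldl_cons]

-- ===== VERDICT (by name: the statement is the Claim_ definition above) =====
theorem dedupe_display_names_py_spec : Claim_equal_dedupe_display_names_py := by
  intro entry_names _
  unfold Spec_dedupe_display_names_py dedupe_display_names_py dedupe_display_names_py_alt
  simp only []
  set L := (entry_names.foldl (pvStepA (PySem.Dict.counter entry_names))
    (PySem.Dict.empty, PySem.Dict.empty)).2 with hL
  have hkeys : L.keys = PySem.Set.ofList entry_names := by
    rw [hL, labels_keys, PySem.Dict.keys_empty, PySem.Set.ofList_eq_foldl, PySem.Set.update]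
  have hnd : L.keys.Nodup := by rw [hkeys]; exact PySem.Set.nodup_ofList entry_names
  rw [PySem.Dict.items_eq_map_keys L hnd "", hkeys, PySem.Dict.items_counter, List.map_map]
  apply List.map_congr_left
  intro k hk
  have hkmem : k ∈ entry_names := (PySem.Set.mem_ofList entry_names k).mp hk
  rw [hL, labels_getD, if_pos hkmem, PySem.Dict.getD_counter, PySem.Dict.getD_empty]
  simp
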